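-- pv_equiv track=rewrite | github.com/navkant/ds_algo_practice | scaler/mod_sum.py | solve
-- ===== SOURCE A (Python) =====
-- def solve(A):
--     n = len(A)
--     summ = 0
--     mod = 10**9 + 7
--
--     for i in range(n-1):
--         summ = (summ + A[i]) % mod
--
--     for i in range(n-1-1, -1, -1):
--         temp = summ - A[i]
--         summ = (summ + temp) % mod
--
--     first = A[0]
--     for i in range(1, n):
--         temp = A[i] % first
--         summ = (summ + temp) % mod
--
--     return summ
-- ===== SOURCE B (Python) =====
-- def solve(A):
--     n = len(A)
--     mod = 10**9 + 7
--     s0 = sum(A[i] for i in range(n - 1)) % mod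
--     summ = (pow(2, n - 1, mod) * s0
--             - sum(pow(2, i, mod) * A[i] for i in range(n - 1))) % mod
--     first = A[0]
--     return (summ + sum(A[i] % first for i in range(1, n))) % mod
-- ===== Notes on version B (the rewrite author's own statement) =====
-- stated objective: alternative
-- what changed: Pass 2's repeated doubling recurrence is replaced by its closed form with explicit power-of-two weights (pow(2,i,mod)), and the per-iteration mod-accumulating loops of passes 1 and 3 are replaced by single sums reduced once.
import Mathlib
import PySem

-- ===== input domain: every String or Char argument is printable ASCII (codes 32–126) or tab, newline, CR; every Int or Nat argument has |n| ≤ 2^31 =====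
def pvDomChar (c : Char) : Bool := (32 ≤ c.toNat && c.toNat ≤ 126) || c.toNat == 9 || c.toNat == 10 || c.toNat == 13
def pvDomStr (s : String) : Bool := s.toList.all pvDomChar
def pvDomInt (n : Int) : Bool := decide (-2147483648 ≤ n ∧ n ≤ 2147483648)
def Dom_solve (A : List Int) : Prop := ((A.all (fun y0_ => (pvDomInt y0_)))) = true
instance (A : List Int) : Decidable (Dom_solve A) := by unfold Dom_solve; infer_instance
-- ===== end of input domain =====

-- B replaces the doubling recurrence of pass 2 by its closed form with explicit
-- power-of-two weights and reduces each pass's sum once (alternative decomposition,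
-- equal value; no speed claim).

-- ===== PORT A =====
def solve (A : List Int) : Int :=
  let n : Int := (A.length : Int)
  let md : Int := 10 ^ 9 + 7
  let summ1 : Int := (PySem.List.pyRange 0 (n - 1) 1).foldl
      (fun summ i => PySem.Int.mod (summ + PySem.List.pyGetD A i 0) md) 0
  let summ2 : Int := (PySem.List.pyRange (n - 1 - 1) (-1) (-1)).foldl
      (fun summ i => PySem.Int.mod (summ + (summ - PySem.List.pyGetD A i 0)) md) summ1
  let first : Int := PySem.List.pyGetD A 0 0
  (PySem.List.pyRange 1 n 1).foldl
      (fun summ i => PySem.Int.mod (summ + PySem.Int.mod (PySem.List.pyGetD A i 0) first) md) summ2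

-- ===== PORT B =====
def solve_alt (A : List Int) : Int :=
  let n : Int := (A.length : Int)
  let md : Int := 10 ^ 9 + 7
  let s0 : Int := PySem.Int.mod
      (((PySem.List.pyRange 0 (n - 1) 1).map (fun i => PySem.List.pyGetD A i 0)).sum) md
  let summ : Int := PySem.Int.mod
      (PySem.Int.powMod 2 (n - 1).toNat md * s0 -
       ((PySem.List.pyRange 0 (n - 1) 1).map
          (fun i => PySem.Int.powMod 2 i.toNat md * PySem.List.pyGetD A i 0)).sum) md
  let first : Int := PySem.List.pyGetD A 0 0
  PySem.Int.mod
    (summ + ((PySem.List.pyRange 1 n 1).map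
        (fun i => PySem.Int.mod (PySem.List.pyGetD A i 0) first)).sum) md

-- ===== PRECONDITION & SPEC =====
-- Pre_ excludes exactly the inputs where the Python A raises: the empty list
-- (IndexError on A[0]) and lists of length ≥ 2 whose first element is 0
-- (ZeroDivisionError in pass 3); B raises there too.
def Pre_solve (A : List Int) : Prop := A ≠ [] ∧ (A.length = 1 ∨ A.getD 0 0 ≠ 0)
instance (A : List Int) : Decidable (Pre_solve A) := by unfold Pre_solve; infer_instance

def pvWitness_solve : List Int := [3, 5, 7]

def Spec_solve (A : List Int) (out : Int) : Prop := out = solve_alt A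
instance (A : List Int) (out : Int) : Decidable (Spec_solve A out) := by unfold Spec_solve; infer_instance

-- ===== CLAIM (what is proved, stated in full; the proofs are below) =====
def Claim_equal_solve : Prop := ∀ (A : List Int), Dom_solve A → Pre_solve A → Spec_solve A (solve A)

-- ===== LEMMAS AND PROOFS =====

-- pass 1/3 shape: a mod-accumulating additive fold is the reduced plain sum
theorem foldl_addm (p : Int) (g : Int → Int) :
    ∀ (l : List Int) (a : Int),
      l.foldl (fun s i => (s + g i) % p) (a % p) = (a + (l.map g).sum) % p := by
  intro l
  induction l with
  | nil => intro a; simp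
  | cons x l ih =>
    intro a
    have h : (a % p + g x) % p = (a + g x) % p :=
      Int.ModEq.add_right (g x) (Int.emod_emod_of_dvd a dvd_rfl)
    simp only [List.foldl_cons, h, ih (a + g x), List.map_cons, List.sum_cons]
    congr 1; ring

-- pass 1 with Python's literal initial accumulator 0
theorem foldl_addm_zero (p : Int) (g : Int → Int) (l : List Int) :
    l.foldl (fun s i => (s + g i) % p) 0 = (l.map g).sum % p := by
  have h := foldl_addm p g l 0
  rw [Int.zero_emod] at h
  rw [h, zero_add]

-- pass 2 shape: the doubling fold over [m-1, …, 0] has the power-of-two closed form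
theorem foldl_double (p : Int) (g : Int → Int) :
    ∀ (m : Nat) (a : Int),
      (PySem.List.pyRange ((m : Int) - 1) (-1) (-1)).foldl
          (fun s i => (s + (s - g i)) % p) (a % p)
        = (2 ^ m * a -
            ((PySem.List.pyRange 0 (m : Int) 1).map (fun i => 2 ^ i.toNat * g i)).sum) % p := by
  intro m
  induction m with
  | zero =>
    intro a
    rw [show ((0 : Nat) : Int) - 1 = -1 by norm_num,
        PySem.List.pyRange_neg_one_eq_nil (le_refl (-1))]
    norm_num [PySem.List.pyRange_one_eq_nil]
  | succ m ih =>
    intro a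
    have hcons : PySem.List.pyRange (((m : Nat) + 1 : Int) - 1) (-1) (-1)
        = ((m : Nat) : Int) :: PySem.List.pyRange (((m : Nat) : Int) - 1) (-1) (-1) := by
      rw [show (((m : Nat) + 1 : Int) - 1) = ((m : Nat) : Int) by ring]
      exact PySem.List.pyRange_neg_one_cons (by omega)
    have hstep : (a % p + (a % p - g (m : Int))) % p = (2 * a - g (m : Int)) % p := by
      have h : Int.ModEq p (a % p) a := (Int.emod_emod_of_dvd a dvd_rfl : Int.ModEq p (a % p) a)
      have := (h.add (h.sub (Int.ModEq.refl (g (m : Int)))))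
      calc (a % p + (a % p - g (m : Int))) % p
          = (a + (a - g (m : Int))) % p := this
        _ = (2 * a - g (m : Int)) % p := by ring_nf
    have hsplit : PySem.List.pyRange 0 (((m : Nat) + 1 : Int)) 1
        = PySem.List.pyRange 0 ((m : Nat) : Int) 1 ++ [((m : Nat) : Int)] := by
      exact PySem.List.pyRange_one_succ_right (by omega)
    push_cast
    rw [hcons, List.foldl_cons, hstep, ih (2 * a - g (m : Int)), hsplit]
    simp only [List.map_append, List.sum_append, List.map_cons, List.map_nil,
      List.sum_cons, List.sum_nil, Int.toNat_natCast]
    congr 1; ring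

-- congruent summands give congruent sums
theorem sum_map_modEq (p : Int) (f f' : Int → Int) :
    ∀ (l : List Int), (∀ x ∈ l, Int.ModEq p (f x) (f' x)) →
      Int.ModEq p ((l.map f).sum) ((l.map f').sum) := by
  intro l
  induction l with
  | nil => intro _; simp [Int.ModEq.refl]
  | cons x l ih =>
    intro h
    simp only [List.map_cons, List.sum_cons]
    exact (h x (by simp)).add (ih (fun y hy => h y (by simp [hy])))

-- ===== VERDICT (by name: the statement is the Claim_ definition above) =====
theorem solve_spec : Claim_equal_solve := by
  intro A _ hpre
  obtain ⟨hne, -⟩ := hpre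
  have hlen : 1 ≤ A.length := List.length_pos_of_ne_nil hne
  unfold Spec_solve solve solve_alt
  have hppos : (0 : Int) < 10 ^ 9 + 7 := by norm_num
  have hmod : ∀ a : Int, PySem.Int.mod a (10 ^ 9 + 7) = a % (10 ^ 9 + 7) :=
    fun a => PySem.Int.mod_eq_emod_of_pos hppos
  simp only [hmod, PySem.Int.powMod]
  obtain ⟨m, hAm⟩ : ∃ m : Nat, A.length = m + 1 := ⟨A.length - 1, by omega⟩
  have hb : ((A.length : Int) - 1) = (m : Int) := by push_cast [hAm]; ring
  have hb2 : ((A.length : Int) - 1 - 1) = (m : Int) - 1 := by rw [hb]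
  rw [hb]
  set p : Int := 10 ^ 9 + 7 with hp
  set g1 : Int → Int := fun i => PySem.List.pyGetD A i 0 with hg1
  set g3 : Int → Int := fun i => PySem.Int.mod (PySem.List.pyGetD A i 0) (PySem.List.pyGetD A 0 0) with hg3
  set S1 : Int := ((PySem.List.pyRange 0 (m : Int) 1).map g1).sum with hS1
  set S3 : Int := ((PySem.List.pyRange 1 (A.length : Int) 1).map g3).sum with hS3
  have e1 : (PySem.List.pyRange 0 (m : Int) 1).foldl (fun s i => (s + g1 i) % p) 0
      = S1 % p := by
    rw [hS1, foldl_addm_zero p g1]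
  have e2 : (PySem.List.pyRange ((m : Int) - 1) (-1) (-1)).foldl
        (fun s i => (s + (s - g1 i)) % p) (S1 % p)
      = (2 ^ m * S1 -
          ((PySem.List.pyRange 0 (m : Int) 1).map (fun i => 2 ^ i.toNat * g1 i)).sum) % p :=
    foldl_double p g1 m S1
  have e3 : ∀ X : Int,
      (PySem.List.pyRange 1 (A.length : Int) 1).foldl (fun s i => (s + g3 i) % p) (X % p)
        = (X + S3) % p := fun X => by rw [hS3, foldl_addm p g3]
  rw [e1, e2, e3]
  have hself : ∀ x : Int, Int.ModEq p (x % p) x := fun x => Int.emod_emod_of_dvd x dvd_rfl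
  have hS : Int.ModEq p
      (((PySem.List.pyRange 0 (m : Int) 1).map (fun i => 2 ^ i.toNat * g1 i)).sum)
      (((PySem.List.pyRange 0 (m : Int) 1).map (fun i => 2 ^ i.toNat % p * g1 i)).sum) :=
    sum_map_modEq p _ _ _ (fun x _ => Int.ModEq.mul_right (g1 x) (hself _).symm)
  have hXY : Int.ModEq p
      (2 ^ m * S1 -
        ((PySem.List.pyRange 0 (m : Int) 1).map (fun i => 2 ^ i.toNat * g1 i)).sum)
      ((2 ^ (m : Int).toNat % p * (S1 % p) -
        ((PySem.List.pyRange 0 (m : Int) 1).map (fun i => 2 ^ i.toNat % p * g1 i)).sum) % p) := by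
    have h1 : Int.ModEq p (2 ^ m * S1) (2 ^ (m : Int).toNat % p * (S1 % p)) := by
      rw [Int.toNat_natCast]
      exact Int.ModEq.mul (hself _).symm (hself _).symm
    exact (h1.sub hS).trans (hself _).symm
  exact Int.ModEq.add_right S3 hXY
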